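-- pv_equiv track=rewrite | github.com/JoonBeomLee/Algorithm_Python | site/PROGRAMMERS/src/python/스킬테스트/level02/뉴스클러스터링.py | seted_str
-- ===== SOURCE A (Python) =====
-- def seted_str(string):
--     string = string.lower()
--     st_list = []
--
--     for st_idx, st in enumerate(string):
--         # 마지막 문자 pass
--         if st_idx == len(string) - 1: break
--
--         if st.isalpha() and string[st_idx+1].isalpha():
--             st_list.append(f"{st}{string[st_idx+1]}")
--
--     return st_list
-- ===== SOURCE B (Python) =====
-- def seted_str(string):
--     # Stage 1: split the lowered string into maximal runs of alphabetic characters.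
--     # Stage 2: each run of length L contributes its L-1 overlapping adjacent pairs.
--     s = string.lower()
--     runs = []
--     cur = ""
--     for ch in s:
--         if ch.isalpha():
--             cur += ch
--         else:
--             if cur:
--                 runs.append(cur)
--             cur = ""
--     if cur:
--         runs.append(cur)
--     return [run[i] + run[i + 1] for run in runs for i in range(len(run) - 1)]
-- ===== Notes on version B (the rewrite author's own statement) =====
-- stated objective: alternative
-- what changed: Instead of testing each adjacent index pair for alphabeticity, B first segments the lowered string into maximal alphabetic runs and then expands each run into its overlapping adjacent pairs.
import Mathlib
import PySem

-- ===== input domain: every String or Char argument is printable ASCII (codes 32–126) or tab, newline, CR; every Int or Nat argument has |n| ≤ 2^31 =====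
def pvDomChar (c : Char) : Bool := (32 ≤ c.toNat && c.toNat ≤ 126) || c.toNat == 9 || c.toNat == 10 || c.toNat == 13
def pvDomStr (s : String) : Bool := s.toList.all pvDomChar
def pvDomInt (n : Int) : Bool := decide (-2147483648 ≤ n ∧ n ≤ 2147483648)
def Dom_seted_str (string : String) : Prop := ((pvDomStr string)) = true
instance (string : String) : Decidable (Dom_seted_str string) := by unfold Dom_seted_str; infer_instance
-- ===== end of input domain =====

-- B replaces A's per-index adjacent-pair test by a two-stage algorithm: segment the lowered
-- string into maximal alphabetic runs, then expand each run into its overlapping pairs.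


-- ===== PORT A =====
-- A's loop: enumerate over the lowered string, break at the last index, otherwise test
-- string[st_idx] and string[st_idx+1]; the break-at-last-index guard means the body runs
-- exactly while two characters remain, so the recursion keeps a one-character lookahead.
def seted_strLoopA : List Char → List String
  | [] => []
  | [_] => []                                   -- st_idx == len(string) - 1: break
  | a :: b :: rest =>
    if PySem.Chars.isalpha a && PySem.Chars.isalpha b then
      String.ofList [a, b] :: seted_strLoopA (b :: rest)
    else
      seted_strLoopA (b :: rest)

def seted_str (string : String) : List String :=
  seted_strLoopA (PySem.Str.lower string).toList

-- ===== PORT B =====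
-- Stage 1 of Source B: the for-loop collecting maximal alphabetic runs (cur accumulator, runs list).
def altRuns : List Char → List Char → List (List Char)
  | cur, [] => if cur.isEmpty then [] else [cur]          -- trailing 'if cur: runs.append(cur)'
  | cur, c :: rest =>
    if PySem.Chars.isalpha c then altRuns (cur ++ [c]) rest
    else (if cur.isEmpty then [] else [cur]) ++ altRuns [] rest

-- Stage 2 of Source B: run[i] + run[i+1] for i in range(len(run) - 1)
def altExpand (run : List Char) : List String :=
  (List.range (run.length - 1)).map (fun i => String.ofList [run.getD i ' ', run.getD (i + 1) ' '])

def seted_str_alt (string : String) : List String :=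
  (altRuns [] (PySem.Str.lower string).toList).flatMap altExpand

-- ===== PRECONDITION & SPEC =====
def Spec_seted_str (string : String) (out : List String) : Prop := out = seted_str_alt string
instance (string : String) (out : List String) : Decidable (Spec_seted_str string out) := by unfold Spec_seted_str; infer_instance

-- ===== CLAIM (what is proved, stated in full; the proofs are below) =====
def Claim_equal_seted_str : Prop := ∀ (string : String), Dom_seted_str string → Spec_seted_str string (seted_str string)

-- ===== LEMMAS AND PROOFS =====
-- On an all-alphabetic run, expansion by indices yields exactly A's adjacent pairs.
theorem altExpand_eq (r : List Char) (h : r.all PySem.Chars.isalpha) :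
    altExpand r = seted_strLoopA r := by
  induction r with
  | nil => simp [altExpand, seted_strLoopA]
  | cons a t ih =>
    cases t with
    | nil => simp [altExpand, seted_strLoopA]
    | cons b t' =>
      simp only [List.all_cons, Bool.and_eq_true] at h
      obtain ⟨ha, hb, ht⟩ := h
      have ihx := ih (by simp [List.all_cons, hb, ht])
      simp only [seted_strLoopA, ha, hb, Bool.and_self, if_true]
      rw [← ihx]
      simp only [altExpand, List.length_cons]
      rw [show (t'.length + 1 + 1 - 1) = (t'.length + 1 - 1) + 1 by omega,
          List.range_succ_eq_map, List.map_cons, List.map_map]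
      refine congrArg₂ _ rfl ?_
      apply List.map_congr_left
      intro i _
      simp

-- A's pair scan splits at any non-alphabetic character.
theorem loopA_split (xs : List Char) (c : Char) (ys : List Char)
    (hc : PySem.Chars.isalpha c = false) :
    seted_strLoopA (xs ++ c :: ys) = seted_strLoopA xs ++ seted_strLoopA ys := by
  induction xs with
  | nil =>
    cases ys with
    | nil => simp [seted_strLoopA]
    | cons d t => simp [seted_strLoopA, hc]
  | cons a xs' ih =>
    cases xs' with
    | nil =>
      cases ys with
      | nil => simp [seted_strLoopA, hc]
      | cons d t => simp [seted_strLoopA, hc]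
    | cons b t =>
      simp only [List.cons_append, seted_strLoopA]
      rw [← List.cons_append, ih]
      split <;> simp

-- Main invariant: with an all-alphabetic pending run cur, flattening B's runs of cur-then-cs
-- gives A's scan of cur ++ cs.
theorem altRuns_flat (cs cur : List Char) (h : cur.all PySem.Chars.isalpha) :
    (altRuns cur cs).flatMap altExpand = seted_strLoopA (cur ++ cs) := by
  induction cs generalizing cur with
  | nil =>
    cases cur with
    | nil => simp [altRuns, seted_strLoopA]
    | cons a t =>
      simp only [altRuns, List.isEmpty_cons]
      simp [altExpand_eq _ h]
  | cons c rest ih =>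
    by_cases hc : PySem.Chars.isalpha c = true
    · rw [show cur ++ c :: rest = (cur ++ [c]) ++ rest by simp]
      rw [← ih (cur ++ [c]) (by simp_all)]
      simp [altRuns, hc]
    · simp only [Bool.not_eq_true] at hc
      rw [loopA_split cur c rest hc]
      simp only [altRuns, hc, Bool.false_eq_true, if_false, List.flatMap_append]
      rw [ih [] (by simp)]
      cases cur with
      | nil => simp [seted_strLoopA]
      | cons a t =>
        simp only [List.isEmpty_cons]
        simp [altExpand_eq _ h]

-- ===== VERDICT (by name: the statement is the Claim_ definition above) =====
theorem seted_str_spec : Claim_equal_seted_str := by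
  intro s _
  unfold Spec_seted_str seted_str seted_str_alt
  exact (altRuns_flat _ [] (by simp)).symm
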